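-- pv_equiv track=rewrite | github.com/Miyankouh/Python-Lab | Algorithm/remove_min.py | remove_min
-- ===== SOURCE A (Python) =====
-- def remove_min(stack):
--     storage_stack = []
--     if len(stack) == 0:
--         return stack
--
--     min = stack.pop()
--     stack.append(min)
--     for i in range(len(stack)):
--         val = stack.pop()
--         if val <= min:
--             min = val
--         storage_stack.append(val)
--
--     for i in range(len(storage_stack)):
--         val = storage_stack.pop()
--         if val != min:
--             stack.append(val)
--
--     return stack, min
-- ===== SOURCE B (Python) =====
-- def remove_min(stack):
--     if not stack:
--         return stack
--     m = min(stack)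
--     stack[:] = [x for x in stack if x != m]
--     return stack, m
-- ===== Notes on version B (the rewrite author's own statement) =====
-- stated objective: simpler
-- what changed: Replaced A's auxiliary storage stack and its two pop/append reversal loops by one builtin min reduction plus a single filtering slice-assignment.
-- outside the precondition, e.g. on remove_min([]): A returns (), B returns ()
import Mathlib
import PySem

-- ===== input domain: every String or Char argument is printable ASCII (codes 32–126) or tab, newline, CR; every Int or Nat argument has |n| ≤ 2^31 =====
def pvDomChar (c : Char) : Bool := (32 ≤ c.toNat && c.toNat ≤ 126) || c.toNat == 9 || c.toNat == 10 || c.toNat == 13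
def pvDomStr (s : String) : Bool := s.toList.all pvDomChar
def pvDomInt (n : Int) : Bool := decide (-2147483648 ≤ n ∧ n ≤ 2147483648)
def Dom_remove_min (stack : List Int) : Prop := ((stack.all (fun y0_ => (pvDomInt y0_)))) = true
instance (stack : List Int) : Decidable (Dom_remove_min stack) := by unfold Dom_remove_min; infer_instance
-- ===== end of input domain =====

-- B removes all minimum elements with builtin min + one filter instead of A's two pop/append
-- reversal loops through an auxiliary stack (objective: simpler). Both Pythons mutate the input
-- list in place identically; the equivalence proved here is about the return value.

-- ===== PORT A =====
-- first Python loop: pops every element off the stack (argument `l` is the stack in pop order,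
-- i.e. reversed), tracks the running minimum, pushes each popped value onto storage_stack
-- (storage kept here head-first in its own pop order)
def rmLoop1 : List Int → Int → List Int → Int × List Int
  | [], m, storage => (m, storage)
  | val :: rest, m, storage =>
      rmLoop1 rest (if val ≤ m then val else m) (val :: storage)

-- second Python loop: pops every element off storage_stack (argument `l` is storage in pop
-- order), appending those ≠ min back onto the (now empty) stack
def rmLoop2 : List Int → Int → List Int → List Int
  | [], _, stack => stack
  | val :: rest, m, stack =>
      rmLoop2 rest m (if val != m then stack ++ [val] else stack)

def remove_min (stack : List Int) : List Int × Int :=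
  match stack.getLast? with
  | none => ([], 0)   -- Python returns the bare list here (not a pair); excluded by Pre_
  | some m0 =>        -- min = stack.pop(); stack.append(min)
      let r := rmLoop1 stack.reverse m0 []
      (rmLoop2 r.2 r.1 [], r.1)

-- ===== PORT B =====
def remove_min_alt (stack : List Int) : List Int × Int :=
  match stack with
  | [] => ([], 0)     -- Python returns the bare list here (not a pair); excluded by Pre_
  | _ :: _ =>
      let m := (PySem.List.min? stack (fun x => x)).getD 0   -- min(stack), stack nonempty
      (stack.filter (fun x => x != m), m)

-- ===== PRECONDITION & SPEC =====
-- Pre_ excludes only the empty stack, on which the Python A (and B) returns the bare input list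
-- rather than a (list, min) pair — a value outside the declared return type List Int × Int.
def Pre_remove_min (stack : List Int) : Prop := stack ≠ []
instance (stack : List Int) : Decidable (Pre_remove_min stack) := by unfold Pre_remove_min; infer_instance
def pvWitness_remove_min : List Int := [3, 1, 2, 1]
def Spec_remove_min (stack : List Int) (out : List Int × Int) : Prop := out = remove_min_alt stack
instance (stack : List Int) (out : List Int × Int) : Decidable (Spec_remove_min stack out) := by unfold Spec_remove_min; infer_instance

-- ===== CLAIM (what is proved, stated in full; the proofs are below) =====
def Claim_equal_remove_min : Prop := ∀ (stack : List Int), Dom_remove_min stack → Pre_remove_min stack → Spec_remove_min stack (remove_min stack)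

-- ===== LEMMAS AND PROOFS =====

lemma rmLoop1_eq (l : List Int) : ∀ (m : Int) (s : List Int),
    rmLoop1 l m s = (l.foldl min m, l.reverse ++ s) := by
  induction l with
  | nil => intro m s; simp [rmLoop1]
  | cons v t ih =>
      intro m s
      have hmin : (if v ≤ m then v else m) = min m v := by
        rw [min_def]; split_ifs <;> omega
      simp [rmLoop1, ih, hmin]

lemma rmLoop2_eq (l : List Int) : ∀ (m : Int) (acc : List Int),
    rmLoop2 l m acc = acc ++ l.filter (fun x => x != m) := by
  induction l with
  | nil => intro m acc; simp [rmLoop2]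
  | cons v t ih =>
      intro m acc
      by_cases h : v = m
      · simp [rmLoop2, ih, h]
      · simp [rmLoop2, ih, h]

-- the running minimum of the first loop equals min(stack)
lemma fold_min_eq (x m0 : Int) (xs : List Int) (hm0 : m0 ∈ x :: xs) :
    (x :: xs).reverse.foldl min m0 = xs.foldl min x := by
  set A := (x :: xs).reverse.foldl min m0 with hA
  set B := xs.foldl min x with hB
  have hAle := PySem.List.foldl_min_le ((x :: xs).reverse) m0
  have hBle := PySem.List.foldl_min_le xs x
  have hAmem := PySem.List.foldl_min_mem ((x :: xs).reverse) m0
  have hBmem := PySem.List.foldl_min_mem xs x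
  have hAmem' : A ∈ x :: xs := by
    rcases hAmem with h | h
    · rw [← hA] at h; rw [h]; exact hm0
    · rw [← hA] at h; exact (List.mem_reverse).1 h
  have hBmem' : B ∈ x :: xs := by
    rcases hBmem with h | h
    · rw [← hB] at h; rw [h]; exact List.mem_cons_self ..
    · rw [← hB] at h; exact List.mem_cons_of_mem _ h
  have hAB : A ≤ B := by
    have := hAle.2 B ((List.mem_reverse).2 hBmem')
    rw [← hA] at this; exact this
  have hBA : B ≤ A := by
    rcases List.mem_cons.1 hAmem' with h | h
    · rw [h]; exact hBle.1
    · exact hBle.2 A h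
  omega

theorem remove_min_spec_aux (x : Int) (xs : List Int) :
    remove_min (x :: xs) = remove_min_alt (x :: xs) := by
  have hne : x :: xs ≠ [] := by simp
  have hlast : (x :: xs).getLast? = some ((x :: xs).getLast hne) := List.getLast?_eq_some_getLast hne
  have hmem : (x :: xs).getLast hne ∈ x :: xs := List.getLast_mem hne
  unfold remove_min
  rw [hlast]
  simp only [rmLoop1_eq, List.reverse_reverse, List.append_nil]
  rw [fold_min_eq x _ xs hmem, rmLoop2_eq]
  unfold remove_min_alt
  rw [PySem.List.min?_id_cons]
  simp

-- ===== VERDICT (by name: the statement is the Claim_ definition above) =====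
theorem remove_min_spec : Claim_equal_remove_min := by
  intro stack _ hpre
  unfold Spec_remove_min
  match stack with
  | [] => exact absurd rfl hpre
  | x :: xs => exact remove_min_spec_aux x xs
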